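-- pv_equiv track=rewrite | github.com/ja9988/Zotero | GCRApps/friendchanges/external_funcs.py | merge_metadata_fof_total
-- ===== SOURCE A (Python) =====
-- def return_fof_ml_str(fof_dict):
--     '''Return fof feature str for ML.
--
--     Inputs
--     ------
--     fof_dict : dict
--         Dictionary of friends of friends. Key is username, values are metadata
--         dictionaries of username's friends
--
--     Returns
--     -------
--     fof_total : dict
--         Dictionary with username keys, values are dictionary with fof_text and username as keys.
--
--     '''
--
--     fof_total = {}
--     for parent_un, parent in fof_dict.items():
--         total_str = ''
--         for x in parent.values():
--             temp_str = x['username'] + ' ' + x['list_name'] + ' ' + x['bio'] + ' ' + x['website']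
--             total_str = total_str + temp_str
--         fof_total[parent_un] = {'username': parent_un, 'fof_text': total_str}
--
--     return fof_total
--
-- def merge_metadata_fof_total(fof_dict, metadata_dict):
--     '''Return fof feature for crypto classifier.
--
--     Inputs
--     ------
--     fof_dict : dict
--         Dictionary of friends of friends. Key is username, values are metadata
--         dictionaries of username's friends
--     metadata_dict : dict
--         Dictionary of metadata of "parents". Key is username, values are
--         metadata for username.
--
--     Returns
--     -------
--     merged_dicts : dict
--         Dictionary containing user's metadata + fof_metadata feature
--         as merged_dicts['username']['fof_text']
--
--     '''
--
--     fof_total = return_fof_ml_str(fof_dict)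
--     merged_dicts = {}
--     for key in metadata_dict.keys():
--         metadata_dict_temp = metadata_dict[key].copy()
--         if key in fof_total.keys():
--             fof_total_temp = fof_total[key]
--         else:
--             # sometimes get_fof doesn't work on all accounts
--             fof_total_temp = {'username': key, 'fof_text': ' '}
--         metadata_dict_temp.update(fof_total_temp)
--         merged_dicts[key] = metadata_dict_temp
--
--     return merged_dicts
-- ===== SOURCE B (Python) =====
-- def merge_metadata_fof_total(fof_dict, metadata_dict):
--     """Single pass over metadata_dict; the fof text is built on the fly,
--     without the intermediate fof_total table."""
--     merged_dicts = {}
--     for key, meta in metadata_dict.items():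
--         if key in fof_dict:
--             fof_text = ''.join(
--                 f['username'] + ' ' + f['list_name'] + ' ' + f['bio'] + ' ' + f['website']
--                 for f in fof_dict[key].values())
--         else:
--             fof_text = ' '
--         merged_dicts[key] = {**meta, 'username': key, 'fof_text': fof_text}
--     return merged_dicts
-- ===== Notes on version B (the rewrite author's own statement) =====
-- stated objective: simpler
-- what changed: B fuses A's two phases (build the fof_total index with a helper, then merge) into a single loop over metadata_dict that builds each fof_text on the fly with ''.join and a dict display, eliminating the intermediate fof_total table and the helper.
import Mathlib
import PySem

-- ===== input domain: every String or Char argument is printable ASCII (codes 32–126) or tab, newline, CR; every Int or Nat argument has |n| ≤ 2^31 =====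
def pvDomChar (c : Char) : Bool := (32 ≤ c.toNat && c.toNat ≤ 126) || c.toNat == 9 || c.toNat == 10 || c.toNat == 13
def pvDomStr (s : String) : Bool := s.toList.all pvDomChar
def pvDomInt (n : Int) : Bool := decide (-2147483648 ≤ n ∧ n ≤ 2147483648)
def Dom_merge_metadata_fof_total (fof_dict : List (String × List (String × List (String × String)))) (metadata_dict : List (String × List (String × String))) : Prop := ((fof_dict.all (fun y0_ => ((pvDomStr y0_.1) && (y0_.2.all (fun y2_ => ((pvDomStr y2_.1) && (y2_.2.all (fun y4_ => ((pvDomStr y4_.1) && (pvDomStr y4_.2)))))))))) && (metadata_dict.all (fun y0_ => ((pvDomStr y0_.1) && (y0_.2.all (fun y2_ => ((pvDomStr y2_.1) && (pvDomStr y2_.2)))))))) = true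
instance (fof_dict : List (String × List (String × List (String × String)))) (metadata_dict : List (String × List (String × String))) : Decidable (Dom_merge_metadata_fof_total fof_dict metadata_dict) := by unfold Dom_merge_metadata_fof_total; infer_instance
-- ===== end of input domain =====

-- B fuses A's two phases (build fof_total index, then merge) into one pass over metadata_dict
-- that builds each fof_text on the fly; objective: simpler (no intermediate table). Neither
-- implementation mutates its arguments.

-- shared input decoding: the Python dict arguments realised as PySem.Dict (Python dict semantics
-- for duplicate keys in the association lists: last value wins, first position kept)
def pvFofD (fof_dict : List (String × List (String × List (String × String)))) :
    PySem.Dict String (PySem.Dict String (PySem.Dict String String)) :=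
  PySem.Dict.ofList (fof_dict.map (fun p => (p.1, PySem.Dict.ofList (p.2.map (fun q => (q.1, PySem.Dict.ofList q.2))))))

def pvMetaD (metadata_dict : List (String × List (String × String))) :
    PySem.Dict String (PySem.Dict String String) :=
  PySem.Dict.ofList (metadata_dict.map (fun p => (p.1, PySem.Dict.ofList p.2)))

-- ===== PORT A =====
-- x['username'] etc. are ported as getD _ ""; exact under Pre_ (all four keys present, so Python
-- does not raise KeyError and the default is never used).
def return_fof_ml_str (fofD : PySem.Dict String (PySem.Dict String (PySem.Dict String String))) :
    PySem.Dict String (PySem.Dict String String) :=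
  fofD.items.foldl (fun fof_total pp =>
    fof_total.insert pp.1 (PySem.Dict.ofList [("username", pp.1),
      ("fof_text", pp.2.values.foldl (fun total_str x =>
        total_str ++ (x.getD "username" "" ++ " " ++ x.getD "list_name" "" ++ " " ++ x.getD "bio" "" ++ " " ++ x.getD "website" "")) "")]))
    PySem.Dict.empty

def merge_metadata_fof_total (fof_dict : List (String × List (String × List (String × String)))) (metadata_dict : List (String × List (String × String))) : List (String × List (String × String)) :=
  let fof_total := return_fof_ml_str (pvFofD fof_dict)
  let metaD := pvMetaD metadata_dict
  let merged_dicts := metaD.keys.foldl (fun merged_dicts key =>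
    -- metadata_dict[key]: key ∈ keys, so the default is never used;
    -- 'if key in fof_total.keys()' + lookup is the match on get? (some ↔ key present)
    let metadata_dict_temp := metaD.getD key PySem.Dict.empty
    let fof_total_temp := match fof_total.get? key with
      | some t => t
      | none => PySem.Dict.ofList [("username", key), ("fof_text", " ")]
    merged_dicts.insert key (metadata_dict_temp.update fof_total_temp.items))
    PySem.Dict.empty
  merged_dicts.items.map (fun p => (p.1, p.2.items))

-- ===== PORT B =====
def pvFriendText (x : PySem.Dict String String) : String :=
  x.getD "username" "" ++ " " ++ x.getD "list_name" "" ++ " " ++ x.getD "bio" "" ++ " " ++ x.getD "website" ""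

def merge_metadata_fof_total_alt (fof_dict : List (String × List (String × List (String × String)))) (metadata_dict : List (String × List (String × String))) : List (String × List (String × String)) :=
  let fofD := pvFofD fof_dict
  ((pvMetaD metadata_dict).items.foldl (fun merged_dicts p =>
    let fof_text := match fofD.get? p.1 with
      | some parent => PySem.Str.join "" (parent.values.map pvFriendText)
      | none => " "
    merged_dicts.insert p.1 ((p.2.insert "username" p.1).insert "fof_text" fof_text))
    PySem.Dict.empty).items.map (fun p => (p.1, p.2.items))

-- ===== PRECONDITION & SPEC =====
-- Pre_ excludes exactly the inputs on which Python A raises KeyError: some friend-of-friend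
-- metadata record missing one of the keys 'username', 'list_name', 'bio', 'website'.
def Pre_merge_metadata_fof_total (fof_dict : List (String × List (String × List (String × String)))) (metadata_dict : List (String × List (String × String))) : Prop :=
  ∀ p ∈ fof_dict, ∀ q ∈ p.2,
    "username" ∈ q.2.map Prod.fst ∧ "list_name" ∈ q.2.map Prod.fst ∧
    "bio" ∈ q.2.map Prod.fst ∧ "website" ∈ q.2.map Prod.fst
instance (fof_dict : List (String × List (String × List (String × String)))) (metadata_dict : List (String × List (String × String))) : Decidable (Pre_merge_metadata_fof_total fof_dict metadata_dict) := by unfold Pre_merge_metadata_fof_total; infer_instance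

def pvWitness_merge_metadata_fof_total : (List (String × List (String × List (String × String)))) × (List (String × List (String × String))) :=
  ([("u", [("f", [("username","a"),("list_name","b"),("bio","c"),("website","d")])])],
   [("u", [("k","v")]), ("w", [])])

def Spec_merge_metadata_fof_total (fof_dict : List (String × List (String × List (String × String)))) (metadata_dict : List (String × List (String × String))) (out : List (String × List (String × String))) : Prop := out = merge_metadata_fof_total_alt fof_dict metadata_dict
instance (fof_dict : List (String × List (String × List (String × String)))) (metadata_dict : List (String × List (String × String))) (out : List (String × List (String × String))) : Decidable (Spec_merge_metadata_fof_total fof_dict metadata_dict out) := by unfold Spec_merge_metadata_fof_total; infer_instance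

-- ===== CLAIM (what is proved, stated in full; the proofs are below) =====
def Claim_equal_merge_metadata_fof_total : Prop := ∀ (fof_dict : List (String × List (String × List (String × String)))) (metadata_dict : List (String × List (String × String))), Dom_merge_metadata_fof_total fof_dict metadata_dict → Pre_merge_metadata_fof_total fof_dict metadata_dict → Spec_merge_metadata_fof_total fof_dict metadata_dict (merge_metadata_fof_total fof_dict metadata_dict)

-- ===== LEMMAS AND PROOFS =====

theorem pv_intercalate_nil (l : List (List Char)) : ([] : List Char).intercalate l = l.flatten := by
  induction l with
  | nil => simp [List.intercalate]
  | cons a t ih =>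
    cases t with
    | nil => simp [List.intercalate]
    | cons b t2 =>
      simp only [List.intercalate, List.intersperse] at *
      simp_all

theorem pv_join_cons (a : String) (l : List String) :
    PySem.Str.join "" (a :: l) = a ++ PySem.Str.join "" l := by
  simp [PySem.Str.join, PySem.Chars.join, pv_intercalate_nil]

theorem pv_join_nil : PySem.Str.join "" ([] : List String) = "" := by
  simp [PySem.Str.join, PySem.Chars.join, List.intercalate]

theorem pv_foldl_str {α : Type} (g : α → String) (l : List α) (s : String) :
    l.foldl (fun t x => t ++ g x) s = s ++ PySem.Str.join "" (l.map g) := by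
  induction l generalizing s with
  | nil => simp [pv_join_nil]
  | cons a t ih => simp [pv_join_cons, ih, String.append_assoc]

theorem pv_foldl_str0 {α : Type} (g : α → String) (l : List α) :
    l.foldl (fun t x => t ++ g x) "" = PySem.Str.join "" (l.map g) := by
  rw [pv_foldl_str]; simp

theorem pv_get?_mk_map {ν μ : Type} (g : String → ν → μ) (l : List (String × ν)) (k : String) :
    (PySem.Dict.mk (l.map (fun p => (p.1, g p.1 p.2)))).get? k
      = ((PySem.Dict.mk l).get? k).map (fun v => g k v) := by
  induction l with
  | nil => simp [PySem.Dict.get?]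
  | cons p t ih =>
    obtain ⟨k0, v0⟩ := p
    simp only [List.map_cons, PySem.Dict.get?_mk_cons, ih]
    by_cases h : k0 == k
    · have hk : k0 = k := eq_of_beq h
      subst hk
      simp
    · simp [h]

theorem pv_ret_get (fofD : PySem.Dict String (PySem.Dict String (PySem.Dict String String)))
    (h : fofD.keys.Nodup) (k : String) :
    (return_fof_ml_str fofD).get? k
      = (fofD.get? k).map (fun parent => PySem.Dict.ofList
          [("username", k), ("fof_text", PySem.Str.join "" (parent.values.map pvFriendText))]) := by
  have hfresh : ∀ a ∈ fofD.items, (PySem.Dict.empty (κ := String) (ν := PySem.Dict String String)).contains a.1 = false := by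
    intro a _; simp [PySem.Dict.contains_empty]
  have hitems := PySem.Dict.items_foldl_insert_fresh (l := fofD.items) (k := fun pp => pp.1)
    (v := fun pp => PySem.Dict.ofList [("username", pp.1),
      ("fof_text", pp.2.values.foldl (fun total_str x =>
        total_str ++ (x.getD "username" "" ++ " " ++ x.getD "list_name" "" ++ " " ++ x.getD "bio" "" ++ " " ++ x.getD "website" "")) "")])
    (d := PySem.Dict.empty) hfresh h
  have hret : return_fof_ml_str fofD = PySem.Dict.mk (fofD.items.map (fun pp => (pp.1,
      PySem.Dict.ofList [("username", pp.1),
        ("fof_text", pp.2.values.foldl (fun total_str x =>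
          total_str ++ (x.getD "username" "" ++ " " ++ x.getD "list_name" "" ++ " " ++ x.getD "bio" "" ++ " " ++ x.getD "website" "")) "")]))) := by
    apply PySem.Dict.ext
    simpa [return_fof_ml_str] using hitems
  rw [hret]
  have := pv_get?_mk_map (g := fun k parent => PySem.Dict.ofList [("username", k),
      ("fof_text", parent.values.foldl (fun total_str (x : PySem.Dict String String) =>
        total_str ++ (x.getD "username" "" ++ " " ++ x.getD "list_name" "" ++ " " ++ x.getD "bio" "" ++ " " ++ x.getD "website" "")) "")])
    (l := fofD.items) k
  rw [this]
  have hd : PySem.Dict.mk fofD.items = fofD := rfl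
  rw [hd]
  congr 1
  funext parent
  have hfold := pv_foldl_str0 (g := pvFriendText) parent.values
  simp only [pvFriendText] at hfold
  rw [hfold]

-- the two-entry record dict of A, as explicit inserts
theorem pv_ofList_two (k T : String) :
    (PySem.Dict.ofList [("username", k), ("fof_text", T)] : PySem.Dict String String).items
      = [("username", k), ("fof_text", T)] := by
  simp [PySem.Dict.ofList, PySem.Dict.update, PySem.Dict.items_insert, PySem.Dict.contains_insert,
    PySem.Dict.empty]

theorem pv_update_two (d : PySem.Dict String String) (k T : String) :
    d.update [("username", k), ("fof_text", T)] = (d.insert "username" k).insert "fof_text" T := by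
  simp [PySem.Dict.update]

-- ===== VERDICT (by name: the statement is the Claim_ definition above) =====
theorem merge_metadata_fof_total_spec : Claim_equal_merge_metadata_fof_total := by
  intro fof_dict metadata_dict _ _
  unfold Spec_merge_metadata_fof_total merge_metadata_fof_total merge_metadata_fof_total_alt
  dsimp only
  have hnd : (pvMetaD metadata_dict).keys.Nodup := PySem.Dict.nodup_keys_ofList _
  have hfnd : (pvFofD fof_dict).keys.Nodup := PySem.Dict.nodup_keys_ofList _
  rw [PySem.Dict.items_eq_map_keys (pvMetaD metadata_dict) hnd PySem.Dict.empty, List.foldl_map]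
  congr 3
  funext merged key
  rw [pv_ret_get (pvFofD fof_dict) hfnd key]
  cases hk : (pvFofD fof_dict).get? key with
  | none => simp [pv_ofList_two, pv_update_two]
  | some parent => simp [pv_ofList_two, pv_update_two]
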